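-- pv_equiv track=rewrite | github.com/sakurasakura1996/Leetcode | 滑动窗口/problem1040_移动石子直到连续II.py | numMovesStonesII_2
-- ===== SOURCE A (Python) =====
-- from typing import List
--
-- def numMovesStonesII_2(stones: List[int]) -> List[int]:
--     # minimum moves
--     # 寻找包含最多石子的窗口
--     stones.sort()
--     n = len(stones)
--     i = j = 0
--     maxcount, left, count = 0, 0, 0
--     while i < n and j < n:
--         while j < n and stones[j] - stones[i] < n:
--             count += 1
--             j += 1
--         if maxcount <= count:
--             maxcount, left = count, i
--         count -= 1
--         i += 1
--     # 分类讨论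
--     # 注意这里的讨论。
--     if stones[left] + n - 1 not in stones and maxcount == n - 1:  # 1.1
--         minn = 2
--     else:  # 1.2
--         minn = n - maxcount
--     # maximum moves
--     if maxcount == n - 1 and  (stones[n - 1] - stones[1] == n - 2 or stones[n - 2] - stones[0] == n - 2):
--         maxn = stones[n - 1] - stones[0] + 1 - n
--     else:  # 2.2
--         maxn = max(stones[n - 2] - stones[0], stones[n - 1] - stones[1]) - n + 2
--
--     return [minn, maxn]
-- ===== SOURCE B (Python) =====
-- from typing import List
--
-- def numMovesStonesII_2(stones: List[int]) -> List[int]: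
--     stones.sort()
--     n = len(stones)
--     maxcount, left = 0, 0
--     for i in range(n):
--         # first index whose stone exceeds stones[i] + n - 1, by binary search on the sorted list
--         target = stones[i] + n - 1
--         lo, hi = i, n
--         while lo < hi:
--             mid = (lo + hi) // 2
--             if stones[mid] <= target:
--                 lo = mid + 1
--             else:
--                 hi = mid
--         count = lo - i
--         if maxcount <= count:
--             maxcount, left = count, i
--     if maxcount == n - 1 and stones[left] + n - 1 not in stones:
--         minn = 2
--     else:
--         minn = n - maxcount
--     if maxcount == n - 1 and (stones[n - 1] - stones[1] == n - 2 or stones[n - 2] - stones[0] == n - 2):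
--         maxn = stones[n - 1] - stones[0] + 1 - n
--     else:
--         maxn = max(stones[n - 2] - stones[0], stones[n - 1] - stones[1]) - n + 2
--     return [minn, maxn]
-- ===== Notes on version B (the rewrite author's own statement) =====
-- stated objective: alternative
-- what changed: Replaces A's amortized two-pointer sliding window (nested whiles sharing a j pointer and a running count) with an independent hand-written binary search per element that computes each window's stone count directly, keeping the same <= tie-break and classification.
import Mathlib
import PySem

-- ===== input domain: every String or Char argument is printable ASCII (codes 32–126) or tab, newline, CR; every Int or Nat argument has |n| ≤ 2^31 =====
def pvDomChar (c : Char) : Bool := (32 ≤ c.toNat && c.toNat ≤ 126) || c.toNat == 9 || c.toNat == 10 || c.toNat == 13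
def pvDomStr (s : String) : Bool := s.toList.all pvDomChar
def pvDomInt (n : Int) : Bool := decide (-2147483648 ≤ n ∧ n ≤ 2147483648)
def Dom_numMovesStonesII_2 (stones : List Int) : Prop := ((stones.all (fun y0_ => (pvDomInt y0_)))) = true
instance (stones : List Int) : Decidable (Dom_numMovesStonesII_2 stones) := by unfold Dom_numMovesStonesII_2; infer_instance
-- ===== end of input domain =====

-- B replaces A's shared-j two-pointer sliding window with an independent binary search per
-- element (same <= tie-break, same classification); note: both Pythons sort `stones` in place,
-- the equivalence proved here is about the return value.


-- ===== PORT A =====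
-- inner `while j < n and stones[j] - stones[i] < n`, state (j, count)
def innerA (s : List Int) (n i j : Nat) (count : Int) : Nat × Int :=
  if j < n ∧ s.getD j 0 - s.getD i 0 < (n : Int) then innerA s n i (j + 1) (count + 1)
  else (j, count)
termination_by n - j

-- outer `while i < n and j < n`, state (i, j, maxcount, left, count)
def outerA (s : List Int) (n i j : Nat) (maxcount : Int) (left : Nat) (count : Int) : Int × Nat :=
  if i < n ∧ j < n then
    let p := innerA s n i j count
    let mc := if maxcount ≤ p.2 then p.2 else maxcount
    let lf := if maxcount ≤ p.2 then i else left
    outerA s n (i + 1) p.1 mc lf (p.2 - 1)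
  else (maxcount, left)
termination_by n - i

def numMovesStonesII_2 (stones : List Int) : List Int :=
  let s := PySem.List.sorted stones (fun x => x) false
  let n := s.length
  let r := outerA s n 0 0 0 0 0
  let maxcount := r.1
  let left := r.2
  let minn : Int :=
    if (s.getD left 0 + (n : Int) - 1) ∉ s ∧ maxcount = (n : Int) - 1 then 2
    else (n : Int) - maxcount
  let maxn : Int :=
    if maxcount = (n : Int) - 1 ∧
        (s.getD (n - 1) 0 - s.getD 1 0 = (n : Int) - 2 ∨
         s.getD (n - 2) 0 - s.getD 0 0 = (n : Int) - 2) then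
      s.getD (n - 1) 0 - s.getD 0 0 + 1 - (n : Int)
    else
      max (s.getD (n - 2) 0 - s.getD 0 0) (s.getD (n - 1) 0 - s.getD 1 0) - (n : Int) + 2
  [minn, maxn]

-- ===== PORT B =====
-- hand-written `while lo < hi` binary search from Source B
def bisectB (s : List Int) (target : Int) (lo hi : Nat) : Nat :=
  if lo < hi then
    let mid := (lo + hi) / 2
    if s.getD mid 0 ≤ target then bisectB s target (mid + 1) hi
    else bisectB s target lo mid
  else lo
termination_by hi - lo

-- `for i in range(n)` accumulating (maxcount, left)
def loopB (s : List Int) (n : Nat) : Int × Nat :=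
  (List.range n).foldl
    (fun (acc : Int × Nat) (i : Nat) =>
      let lo := bisectB s (s.getD i 0 + (n : Int) - 1) i n
      let count : Int := (lo : Int) - (i : Int)
      if acc.1 ≤ count then (count, i) else acc)
    (0, 0)

def numMovesStonesII_2_alt (stones : List Int) : List Int :=
  let s := PySem.List.sorted stones (fun x => x) false
  let n := s.length
  let p := loopB s n
  let maxcount := p.1
  let left := p.2
  let minn : Int :=
    if maxcount = (n : Int) - 1 ∧ (s.getD left 0 + (n : Int) - 1) ∉ s then 2
    else (n : Int) - maxcount
  let maxn : Int :=
    if maxcount = (n : Int) - 1 ∧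
        (s.getD (n - 1) 0 - s.getD 1 0 = (n : Int) - 2 ∨
         s.getD (n - 2) 0 - s.getD 0 0 = (n : Int) - 2) then
      s.getD (n - 1) 0 - s.getD 0 0 + 1 - (n : Int)
    else
      max (s.getD (n - 2) 0 - s.getD 0 0) (s.getD (n - 1) 0 - s.getD 1 0) - (n : Int) + 2
  [minn, maxn]

-- ===== PRECONDITION & SPEC =====
-- Pre_ excludes lists of fewer than 2 stones, on which both Pythons raise IndexError
-- (stones[1] / stones[n-2] in the maximum-moves classification).
def Pre_numMovesStonesII_2 (stones : List Int) : Prop := 2 ≤ stones.length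
instance (stones : List Int) : Decidable (Pre_numMovesStonesII_2 stones) := by
  unfold Pre_numMovesStonesII_2; infer_instance
def pvWitness_numMovesStonesII_2 : List Int := [7, 4, 9]

def Spec_numMovesStonesII_2 (stones : List Int) (out : List Int) : Prop := out = numMovesStonesII_2_alt stones
instance (stones : List Int) (out : List Int) : Decidable (Spec_numMovesStonesII_2 stones out) := by unfold Spec_numMovesStonesII_2; infer_instance

-- ===== CLAIM (what is proved, stated in full; the proofs are below) =====
def Claim_equal_numMovesStonesII_2 : Prop := ∀ (stones : List Int), Dom_numMovesStonesII_2 stones → Pre_numMovesStonesII_2 stones → Spec_numMovesStonesII_2 stones (numMovesStonesII_2 stones)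

-- ===== LEMMAS AND PROOFS =====

-- monotone access on the sorted list
lemma sorted_getD_mono (xs : List Int) :
    ∀ p q, p ≤ q → q < (PySem.List.sorted xs (fun x => x) false).length →
      (PySem.List.sorted xs (fun x => x) false).getD p 0 ≤
      (PySem.List.sorted xs (fun x => x) false).getD q 0 := by
  intro p q hpq hq
  have hp : p < (PySem.List.sorted xs (fun x => x) false).length := lt_of_le_of_lt (by omega) hq
  rw [List.getD_eq_getElem _ _ hp, List.getD_eq_getElem _ _ hq]
  exact PySem.List.key_sorted_getElem_mono (key := fun x => x) (xs := xs) hpq hq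

-- specification of B's binary search
lemma bisectB_spec (s : List Int) (t : Int)
    (hmono : ∀ p q, p ≤ q → q < s.length → s.getD p 0 ≤ s.getD q 0) :
    ∀ d lo hi, hi - lo ≤ d → lo ≤ hi → hi ≤ s.length →
      lo ≤ bisectB s t lo hi ∧ bisectB s t lo hi ≤ hi ∧
      (∀ k, lo ≤ k → k < bisectB s t lo hi → s.getD k 0 ≤ t) ∧
      (bisectB s t lo hi < hi → t < s.getD (bisectB s t lo hi) 0) := by
  intro d
  induction d with
  | zero =>
    intro lo hi hd hle hhi
    have : lo = hi := by omega
    subst this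
    rw [bisectB, if_neg (lt_irrefl lo)]
    exact ⟨le_refl _, le_refl _, fun k h1 h2 => absurd h2 (by omega), fun h => absurd h (by omega)⟩
  | succ d ih =>
    intro lo hi hd hle hhi
    by_cases h : lo < hi
    · rw [bisectB, if_pos h]
      have hmid1 : lo ≤ (lo + hi) / 2 := by omega
      have hmid2 : (lo + hi) / 2 < hi := by omega
      by_cases hv : s.getD ((lo + hi) / 2) 0 ≤ t
      · rw [if_pos hv]
        obtain ⟨h1, h2, h3, h4⟩ := ih ((lo + hi) / 2 + 1) hi (by omega) (by omega) hhi
        refine ⟨by omega, h2, ?_, h4⟩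
        intro k hk1 hk2
        by_cases hk : (lo + hi) / 2 + 1 ≤ k
        · exact h3 k hk hk2
        · exact le_trans (hmono k ((lo + hi) / 2) (by omega) (by omega)) hv
      · rw [if_neg hv]
        obtain ⟨h1, h2, h3, h4⟩ := ih lo ((lo + hi) / 2) (by omega) (by omega) (by omega)
        refine ⟨h1, by omega, h3, ?_⟩
        intro hlt
        by_cases hend : bisectB s t lo ((lo + hi) / 2) < (lo + hi) / 2
        · exact h4 hend
        · have : bisectB s t lo ((lo + hi) / 2) = (lo + hi) / 2 := by omega
          rw [this]; omega
    · rw [bisectB, if_neg h]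
      exact ⟨le_refl _, hle, fun k h1 h2 => absurd h2 (by omega), fun hlt => absurd hlt h⟩

-- specification of A's inner while loop
lemma innerA_spec (s : List Int) (n i : Nat) :
    ∀ d j count, n - j ≤ d → j ≤ n →
      j ≤ (innerA s n i j count).1 ∧ (innerA s n i j count).1 ≤ n ∧
      (innerA s n i j count).2 = count + (((innerA s n i j count).1 : Int) - (j : Int)) ∧
      (∀ k, j ≤ k → k < (innerA s n i j count).1 → s.getD k 0 - s.getD i 0 < (n : Int)) ∧
      ((innerA s n i j count).1 < n →
        ¬ (s.getD ((innerA s n i j count).1) 0 - s.getD i 0 < (n : Int))) := by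
  intro d
  induction d with
  | zero =>
    intro j count hd hj
    have hjn : j = n := by omega
    have : ¬ (j < n ∧ s.getD j 0 - s.getD i 0 < (n : Int)) := by omega
    rw [innerA, if_neg this]
    refine ⟨le_refl _, hj, by push_cast; ring, ?_, by omega⟩
    intro k hk1 hk2; omega
  | succ d ih =>
    intro j count hd hj
    by_cases h : j < n ∧ s.getD j 0 - s.getD i 0 < (n : Int)
    · rw [innerA, if_pos h]
      obtain ⟨h1, h2, h3, h4, h5⟩ := ih (j + 1) (count + 1) (by omega) (by omega)
      refine ⟨by omega, h2, by rw [h3]; push_cast; ring, ?_, h5⟩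
      intro k hk1 hk2
      by_cases hk : j + 1 ≤ k
      · exact h4 k hk hk2
      · have : k = j := by omega
        rw [this]; exact h.2
    · rw [innerA, if_neg h]
      refine ⟨le_refl _, hj, by push_cast; ring, ?_, ?_⟩
      · intro k hk1 hk2; omega
      · intro h1 h2; exact h ⟨h1, h2⟩

-- B's fold does not change the state once maxcount strictly dominates every remaining count
lemma foldB_tail (s : List Int) (n : Nat)
    (hmono : ∀ p q, p ≤ q → q < s.length → s.getD p 0 ≤ s.getD q 0) (hn : n ≤ s.length) :
    ∀ len a (mc : Int) (lf : Nat), a + len = n → ((n : Int) - (a : Int)) < mc →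
      (List.range' a len).foldl
        (fun (acc : Int × Nat) (i : Nat) =>
          let lo := bisectB s (s.getD i 0 + (n : Int) - 1) i n
          let count : Int := (lo : Int) - (i : Int)
          if acc.1 ≤ count then (count, i) else acc)
        (mc, lf) = (mc, lf) := by
  intro len
  induction len with
  | zero => intro a mc lf _ _; simp
  | succ len ih =>
    intro a mc lf ha hmc
    rw [List.range'_succ, List.foldl_cons]
    obtain ⟨h1, h2, _, _⟩ :=
      bisectB_spec s (s.getD a 0 + (n : Int) - 1) hmono (n - a) a n (by omega) (by omega) hn
    have hcnt : ((bisectB s (s.getD a 0 + (n : Int) - 1) a n : Nat) : Int) - (a : Int) < mc := by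
      have : ((bisectB s (s.getD a 0 + (n : Int) - 1) a n : Nat) : Int) ≤ (n : Int) := by
        exact_mod_cast h2
      omega
    simp only []
    rw [if_neg (by simpa using not_le.mpr hcnt)]
    exact ih (a + 1) mc lf (by omega) (by push_cast; omega)

-- the heart: A's two-pointer outer loop equals B's per-element binary-search fold
lemma outerA_eq_foldB (s : List Int) (n : Nat) (hn : n = s.length)
    (hmono : ∀ p q, p ≤ q → q < s.length → s.getD p 0 ≤ s.getD q 0) :
    ∀ d i j (mc : Int) (lf : Nat) (count : Int), n - i ≤ d → i ≤ j → j ≤ n →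
      count = (j : Int) - (i : Int) →
      (i < n → ∀ k, i ≤ k → k < j → s.getD k 0 < s.getD i 0 + (n : Int)) →
      (j = n → i < n → ((n : Int) - (i : Int)) < mc) →
      outerA s n i j mc lf count =
        (List.range' i (n - i)).foldl
          (fun (acc : Int × Nat) (i : Nat) =>
            let lo := bisectB s (s.getD i 0 + (n : Int) - 1) i n
            let count : Int := (lo : Int) - (i : Int)
            if acc.1 ≤ count then (count, i) else acc)
          (mc, lf) := by
  intro d
  induction d with
  | zero =>
    intro i j mc lf count hd hij hjn hcount h4 h5
    have hin : i = n ∨ n ≤ i := by omega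
    have hni : n - i = 0 := by omega
    rw [hni]
    have : ¬ (i < n ∧ j < n) := by omega
    rw [outerA, if_neg this]
    simp
  | succ d ih =>
    intro i j mc lf count hd hij hjn hcount h4 h5
    by_cases hi : i < n
    · by_cases hj : j < n
      · -- real iteration
        rw [outerA, if_pos ⟨hi, hj⟩]
        obtain ⟨g1, g2, g3, g4, g5⟩ := innerA_spec s n i (n - j) j count (le_refl _) (by omega)
        set j' := (innerA s n i j count).1 with hj'def
        set r := bisectB s (s.getD i 0 + (n : Int) - 1) i n with hrdef
        obtain ⟨b1, b2, b3, b4⟩ :=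
          bisectB_spec s (s.getD i 0 + (n : Int) - 1) hmono (n - i) i n (by omega) (by omega)
            (by omega)
        rw [← hrdef] at b1 b2 b3 b4
        -- all of [i, j') is inside the window
        have hwin : ∀ k, i ≤ k → k < j' → s.getD k 0 < s.getD i 0 + (n : Int) := by
          intro k hk1 hk2
          by_cases hk : k < j
          · exact h4 hi k hk1 hk
          · have := g4 k (by omega) hk2; omega
        -- uniqueness: r = j'
        have hrj : r = j' := by
          rcases lt_trichotomy r j' with h | h | h
          · exfalso
            have hrn : r < n := by omega
            have := b4 hrn
            have := hwin r (by omega) h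
            omega
          · exact h
          · exfalso
            have hj'n : j' < n := by omega
            have := g5 hj'n
            have := b3 j' (by omega) h
            omega
        -- j' is strictly past i
        have hj'i : i < j' := by
          by_contra hcon
          have hji : j' = i := by omega
          have := g5 (by omega)
          rw [hji] at this
          omega
        have hcount' : (innerA s n i j count).2 = (j' : Int) - (i : Int) := by
          rw [g3, hcount]; ring
        have hrange : n - i = (n - (i + 1)) + 1 := by omega
        rw [hrange, List.range'_succ, List.foldl_cons]
        show outerA s n (i + 1) (innerA s n i j count).1
            (if mc ≤ (innerA s n i j count).2 then (innerA s n i j count).2 else mc)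
            (if mc ≤ (innerA s n i j count).2 then i else lf)
            ((innerA s n i j count).2 - 1) =
          List.foldl _
            (if mc ≤ ((bisectB s (s.getD i 0 + (n : Int) - 1) i n : Nat) : Int) - (i : Int) then
              (((bisectB s (s.getD i 0 + (n : Int) - 1) i n : Nat) : Int) - (i : Int), i)
            else (mc, lf)) _
        rw [hcount', ← hj'def, ← hrdef, hrj]
        by_cases hup : mc ≤ (j' : Int) - (i : Int)
        · rw [if_pos hup, if_pos hup, if_pos hup]
          exact ih (i + 1) j' ((j' : Int) - (i : Int)) i ((j' : Int) - (i : Int) - 1) (by omega)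
            (by omega) (by omega) (by push_cast; ring)
            (by
              intro hi1 k hk1 hk2
              have h1 := hwin k (by omega) hk2
              have h2 := hmono i (i + 1) (by omega) (by omega)
              omega)
            (by intro hje hi1; push_cast; omega)
        · rw [if_neg hup, if_neg hup, if_neg hup]
          exact ih (i + 1) j' mc lf ((j' : Int) - (i : Int) - 1) (by omega)
            (by omega) (by omega) (by push_cast; ring)
            (by
              intro hi1 k hk1 hk2
              have h1 := hwin k (by omega) hk2
              have h2 := hmono i (i + 1) (by omega) (by omega)
              omega)
            (by intro hje hi1; push_cast; omega)
      · -- j = n, early exit: the remaining fold is inert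
        have hje : j = n := by omega
        have : ¬ (i < n ∧ j < n) := by omega
        rw [outerA, if_neg this]
        exact (foldB_tail s n hmono (by omega) (n - i) i mc lf (by omega)
          (h5 hje hi)).symm
    · have hni : n - i = 0 := by omega
      have : ¬ (i < n ∧ j < n) := by omega
      rw [hni, outerA, if_neg this]
      simp

lemma outerA_eq_loopB (xs : List Int) :
    outerA (PySem.List.sorted xs (fun x => x) false)
      (PySem.List.sorted xs (fun x => x) false).length 0 0 0 0 0 =
    loopB (PySem.List.sorted xs (fun x => x) false)
      (PySem.List.sorted xs (fun x => x) false).length := by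
  set s := PySem.List.sorted xs (fun x => x) false with hs
  unfold loopB
  rw [List.range_eq_range']
  have h := outerA_eq_foldB s s.length rfl (sorted_getD_mono xs) s.length 0 0 0 0 0
    (by omega) (by omega) (by omega) (by norm_num)
    (by intro _ k hk1 hk2; omega)
    (by intro h0 h1; omega)
  simpa using h

-- reordering the conjunction in the minimum-moves test
lemma ite_and_comm {α : Type} (P Q : Prop) [Decidable P] [Decidable Q] (a b : α) :
    (if P ∧ Q then a else b) = (if Q ∧ P then a else b) := by
  by_cases hP : P <;> by_cases hQ : Q <;> simp [hP, hQ]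

-- ===== VERDICT (by name: the statement is the Claim_ definition above) =====
theorem numMovesStonesII_2_spec : Claim_equal_numMovesStonesII_2 := by
  intro stones _ _
  unfold Spec_numMovesStonesII_2 numMovesStonesII_2 numMovesStonesII_2_alt
  simp only []
  rw [outerA_eq_loopB stones]
  rw [ite_and_comm]
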